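-- pv_equiv track=rewrite | github.com/tusaunyapat/CompProg | 0934.py | pattern6
-- ===== SOURCE A (Python) =====
-- def pattern6(N):
--     ans = []
--     run = 1
--     for i in range(N):
--         ans.append([0]*i)
--
--     for i in range(N):
--         if i%2 == 0:
--             for j in range(N-i):
--                 ans[j].append(run)
--                 run += 1
--         else :
--             for j in range(N-i,0,-1):
--                 ans[j-1].append(run)
--                 run += 1
--
--     return ans
-- ===== SOURCE B (Python) =====
-- def pattern6(N):
--     starts = [1 + d * N - d * (d - 1) // 2 for d in range(N)]
--     return [[0] * r + [starts[d] + (r if d % 2 == 0 else N - d - 1 - r)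
--                        for d in range(N - r)]
--             for r in range(N)]
-- ===== Notes on version B (the rewrite author's own statement) =====
-- stated objective: alternative
-- what changed: A sweeps the grid diagonal by diagonal with a running counter, appending to rows in alternating directions; B precomputes each diagonal's starting number by the closed-form formula 1+d*N-d*(d-1)//2 and builds every row in one comprehension from that formula plus a parity-dependent offset, with no running counter and no mutation.
import Mathlib
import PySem

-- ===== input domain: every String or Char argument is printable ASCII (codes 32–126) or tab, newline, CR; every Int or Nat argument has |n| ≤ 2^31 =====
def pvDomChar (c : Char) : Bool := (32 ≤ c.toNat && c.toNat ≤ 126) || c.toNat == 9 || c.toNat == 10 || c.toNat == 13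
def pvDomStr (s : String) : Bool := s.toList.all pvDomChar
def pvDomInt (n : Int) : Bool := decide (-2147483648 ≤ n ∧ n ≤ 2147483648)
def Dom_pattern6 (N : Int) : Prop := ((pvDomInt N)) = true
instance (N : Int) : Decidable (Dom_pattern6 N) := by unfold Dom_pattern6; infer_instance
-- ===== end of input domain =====

-- B replaces A's diagonal sweep with a running counter by a per-cell closed-form formula (objective: alternative).

-- ===== PORT A =====
-- ans[j].append(run) followed by incrementing run   (the body of both inner loops)
def pvAppendAt (st : List (List Int) × Int) (j : Int) : List (List Int) × Int :=
  (st.1.modify j.toNat (fun row => row ++ [st.2]), st.2 + 1)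

-- one iteration of the outer 'for i in range(N)' loop
def pvDiagonal (N : Int) (st : List (List Int) × Int) (i : Int) : List (List Int) × Int :=
  if PySem.Int.mod i 2 = 0 then
    (PySem.List.pyRange 0 (N - i) 1).foldl pvAppendAt st
  else
    (PySem.List.pyRange (N - i) 0 (-1)).foldl (fun st j => pvAppendAt st (j - 1)) st

def pattern6 (N : Int) : List (List Int) :=
  let ans := (PySem.List.pyRange 0 N 1).foldl
    (fun ans i => ans ++ [List.replicate i.toNat (0 : Int)]) []
  ((PySem.List.pyRange 0 N 1).foldl (pvDiagonal N) (ans, 1)).1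

-- ===== PORT B =====
def pattern6_alt (N : Int) : List (List Int) :=
  let starts := (PySem.List.pyRange 0 N 1).map
    (fun d => 1 + d * N - PySem.Int.floordiv (d * (d - 1)) 2)
  (PySem.List.pyRange 0 N 1).map (fun r =>
    List.replicate r.toNat (0 : Int) ++
      (PySem.List.pyRange 0 (N - r) 1).map (fun d =>
        PySem.List.pyGetD starts d 0 +
          (if PySem.Int.mod d 2 = 0 then r else N - d - 1 - r)))

-- ===== PRECONDITION & SPEC =====
def Spec_pattern6 (N : Int) (out : List (List Int)) : Prop := out = pattern6_alt N
instance (N : Int) (out : List (List Int)) : Decidable (Spec_pattern6 N out) := by unfold Spec_pattern6; infer_instance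

-- ===== CLAIM (what is proved, stated in full; the proofs are below) =====
def Claim_equal_pattern6 : Prop := ∀ (N : Int), Dom_pattern6 N → Spec_pattern6 N (pattern6 N)

-- ===== LEMMAS AND PROOFS =====

-- the running counter at the start of diagonal d (run = pvSD n d in A's loop)
def pvSD (n : Nat) : Nat → Int
  | 0 => 1
  | k + 1 => pvSD n k + ((n : Int) - k)

-- the value A puts in row r on diagonal k
def pvV (n r k : Nat) : Int :=
  pvSD n k + (if k % 2 = 0 then (r : Int) else (n : Int) - k - 1 - r)

-- row r after A has processed the first d diagonals
def pvRow (n d r : Nat) : List Int :=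
  List.replicate r (0 : Int) ++ (List.range (min d (n - r))).map (pvV n r)

def pvGrid (n d : Nat) : List (List Int) := (List.range n).map (pvRow n d)

theorem pv_modify_map_range {f : Nat → List Int} {n t : Nat} (g : List Int → List Int) :
    ((List.range n).map f).modify t g
      = (List.range n).map (fun r => if r = t then g (f r) else f r) := by
  apply List.ext_getElem
  · simp
  · intro i h1 h2
    simp only [List.getElem_modify, List.getElem_map, List.getElem_range]
    simp only [List.length_modify, List.length_map, List.length_range] at h1
    by_cases hit : t = i
    · simp [hit]
    · simp [hit, Ne.symm hit]

theorem pv_innerEven (t : Nat) (f : Nat → List Int) (n : Nat) (run : Int) :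
    (PySem.List.pyRange 0 (t : Int) 1).foldl pvAppendAt ((List.range n).map f, run)
      = ((List.range n).map (fun r => if r < t then f r ++ [run + r] else f r), run + t) := by
  induction t with
  | zero => simp [PySem.List.pyRange_one_eq_nil]
  | succ t ih =>
    have hcast : ((t + 1 : Nat) : Int) = (t : Int) + 1 := by omega
    rw [hcast, PySem.List.pyRange_one_succ_right (by positivity), List.foldl_append, ih]
    simp only [List.foldl_cons, List.foldl_nil, pvAppendAt, Prod.mk.injEq]
    constructor
    · show (((List.range n).map _).modify (t : Int).toNat _) = _
      rw [Int.toNat_natCast, pv_modify_map_range]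
      apply List.map_congr_left
      intro r _
      by_cases h1 : r = t
      · subst h1; simp
      · by_cases h2 : r < t <;> by_cases h3 : r < t + 1 <;> simp [h1, h2, h3] <;> omega
    · show run + (t : Int) + 1 = run + ((t + 1 : Nat) : Int)
      push_cast; ring

theorem pv_innerOdd (t : Nat) (f : Nat → List Int) (n : Nat) (run : Int) :
    (PySem.List.pyRange (t : Int) 0 (-1)).foldl (fun st j => pvAppendAt st (j - 1))
        ((List.range n).map f, run)
      = ((List.range n).map (fun r => if r < t then f r ++ [run + t - 1 - r] else f r), run + t) := by
  induction t generalizing f run with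
  | zero => simp [PySem.List.pyRange_neg_one_eq_nil]
  | succ t ih =>
    have hcast : ((t + 1 : Nat) : Int) = (t : Int) + 1 := by omega
    rw [hcast, PySem.List.pyRange_neg_one_cons (by positivity)]
    simp only [List.foldl_cons]
    have hstep : pvAppendAt ((List.range n).map f, run) ((t : Int) + 1 - 1)
        = ((List.range n).map (fun r => if r = t then f r ++ [run] else f r), run + 1) := by
      simp only [pvAppendAt, add_sub_cancel_right, Int.toNat_natCast]
      rw [pv_modify_map_range]
    rw [hstep, show (t : Int) + 1 - 1 = (t : Int) by ring, ih]
    simp only [Prod.mk.injEq]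
    constructor
    · apply List.map_congr_left
      intro r _
      by_cases h1 : r = t
      · subst h1; simp
        ring
      · by_cases h2 : r < t
        · have h3 : r < t + 1 := by omega
          simp only [h2, if_pos, h1, h3]
          simp
          ring
        · have h3 : ¬ r < t + 1 := by omega
          simp [h1, h2, h3]
    · ring

theorem pv_row_even (n d : Nat) (hd : d % 2 = 0) :
    (fun r => if r < n - d then pvRow n d r ++ [pvSD n d + r] else pvRow n d r)
      = pvRow n (d + 1) := by
  funext r
  by_cases h : r < n - d
  · have h1 : min d (n - r) = d := by omega
    have h2 : min (d + 1) (n - r) = d + 1 := by omega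
    simp only [h, if_pos, pvRow, h1, h2, List.range_succ, List.map_append, List.map_cons,
      List.map_nil, List.append_assoc]
    simp [pvV, hd]
  · have h1 : min d (n - r) = n - r := by omega
    have h2 : min (d + 1) (n - r) = n - r := by omega
    simp [h, pvRow, h1, h2]

theorem pv_row_odd (n d : Nat) (hd : d % 2 = 1) :
    (fun r => if r < n - d then pvRow n d r ++ [pvSD n d + (n - d : Nat) - 1 - r] else pvRow n d r)
      = pvRow n (d + 1) := by
  funext r
  by_cases h : r < n - d
  · have h1 : min d (n - r) = d := by omega
    have h2 : min (d + 1) (n - r) = d + 1 := by omega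
    simp only [h, if_pos, pvRow, h1, h2, List.range_succ, List.map_append, List.map_cons,
      List.map_nil, List.append_assoc]
    have hcast : ((n - d : Nat) : Int) = (n : Int) - d := by omega
    have : d % 2 ≠ 0 := by omega
    simp [pvV, this, hcast]
    ring
  · have h1 : min d (n - r) = n - r := by omega
    have h2 : min (d + 1) (n - r) = n - r := by omega
    simp [h, pvRow, h1, h2]

theorem pv_outer (n : Nat) (d : Nat) (hd : d ≤ n) :
    (PySem.List.pyRange 0 (d : Int) 1).foldl (pvDiagonal (n : Int)) (pvGrid n 0, 1)
      = (pvGrid n d, pvSD n d) := by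
  induction d with
  | zero => simp [PySem.List.pyRange_one_eq_nil, pvSD]
  | succ d ih =>
    have hdn : d ≤ n := by omega
    have hcast : ((d + 1 : Nat) : Int) = (d : Int) + 1 := by omega
    rw [hcast, PySem.List.pyRange_one_succ_right (by positivity), List.foldl_append, ih hdn]
    simp only [List.foldl_cons, List.foldl_nil, pvDiagonal]
    have hnd : (n : Int) - (d : Int) = ((n - d : Nat) : Int) := by omega
    have hmod : PySem.Int.mod (d : Int) 2 = ((d % 2 : Nat) : Int) := by
      exact_mod_cast PySem.Int.mod_natCast d 2
    by_cases hpar : d % 2 = 0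
    · rw [if_pos (by rw [hmod, hpar]; rfl)]
      rw [hnd]
      show (PySem.List.pyRange 0 _ 1).foldl pvAppendAt ((List.range n).map (pvRow n d), _) = _
      rw [pv_innerEven (n - d) (pvRow n d) n (pvSD n d)]
      rw [pv_row_even n d hpar]
      simp only [Prod.mk.injEq]
      constructor
      · rfl
      · show pvSD n d + ((n - d : Nat) : Int) = pvSD n (d + 1)
        simp [pvSD]; omega
    · have hpar1 : d % 2 = 1 := by omega
      rw [if_neg (by rw [hmod, hpar1]; decide)]
      rw [hnd]
      show (PySem.List.pyRange _ 0 (-1)).foldl _ ((List.range n).map (pvRow n d), _) = _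
      rw [pv_innerOdd (n - d) (pvRow n d) n (pvSD n d)]
      rw [pv_row_odd n d hpar1]
      simp only [Prod.mk.injEq]
      constructor
      · rfl
      · show pvSD n d + ((n - d : Nat) : Int) = pvSD n (d + 1)
        simp [pvSD]; omega

theorem pv_init (n : Nat) :
    (PySem.List.pyRange 0 (n : Int) 1).foldl
        (fun ans i => ans ++ [List.replicate i.toNat (0 : Int)]) []
      = pvGrid n 0 := by
  rw [PySem.List.foldl_append_singleton_eq_map, PySem.List.pyRange_one]
  simp [pvGrid, pvRow, List.map_map, Function.comp]

theorem pv_SD_closed (n k : Nat) :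
    pvSD n k = 1 + (k : Int) * n - PySem.Int.floordiv ((k : Int) * ((k : Int) - 1)) 2 := by
  induction k with
  | zero => simp [pvSD, PySem.Int.floordiv]
  | succ k ih =>
    rw [PySem.Int.floordiv_eq_ediv_of_pos (by norm_num)] at ih ⊢
    have hsplit : ((k + 1 : Nat) : Int) * (((k + 1 : Nat) : Int) - 1)
        = (k : Int) * ((k : Int) - 1) + (k : Int) * 2 := by push_cast; ring
    rw [hsplit, Int.add_mul_ediv_right _ _ (by norm_num)]
    simp only [pvSD, ih]
    push_cast; ring

theorem pv_alt_eq (n : Nat) : pattern6_alt (n : Int) = pvGrid n n := by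
  unfold pattern6_alt pvGrid
  rw [PySem.List.pyRange_one]
  simp only [sub_zero, Int.toNat_natCast, List.map_map, Function.comp_def, zero_add]
  apply List.map_congr_left
  intro r hr
  rw [List.mem_range] at hr
  rw [pvRow, min_eq_right (Nat.sub_le n r)]
  congr 1
  rw [show ((n : Int) - r) = ((n - r : Nat) : Int) by omega, PySem.List.pyRange_one]
  simp only [sub_zero, List.map_map, Function.comp_def, zero_add]
  apply List.map_congr_left
  intro k hk
  rw [List.mem_range] at hk
  have hkn : k < n := by omega
  rw [PySem.List.pyGetD_natCast,
    List.getD_eq_getElem _ _ (by simpa using hkn), List.getElem_map, List.getElem_range]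
  rw [← pv_SD_closed n k, pvV]
  have hmod : PySem.Int.mod (k : Int) 2 = ((k % 2 : Nat) : Int) := by
    exact_mod_cast PySem.Int.mod_natCast k 2
  by_cases hpar : k % 2 = 0
  · rw [if_pos (by rw [hmod, hpar]; rfl), if_pos hpar]
  · have : k % 2 = 1 := by omega
    rw [if_neg (by rw [hmod, this]; decide), if_neg hpar]

-- ===== VERDICT (by name: the statement is the Claim_ definition above) =====
theorem pattern6_spec : Claim_equal_pattern6 := by
  intro N _
  show pattern6 N = pattern6_alt N
  by_cases hN : N ≤ 0
  · unfold pattern6 pattern6_alt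
    rw [PySem.List.pyRange_one_eq_nil hN]
    rfl
  · obtain ⟨n, hn⟩ : ∃ n : Nat, N = (n : Int) := ⟨N.toNat, by omega⟩
    subst hn
    show ((PySem.List.pyRange 0 (n : Int) 1).foldl (pvDiagonal (n : Int))
      ((PySem.List.pyRange 0 (n : Int) 1).foldl
        (fun ans i => ans ++ [List.replicate i.toNat (0 : Int)]) [], 1)).1 = pattern6_alt (n : Int)
    rw [pv_init n, pv_outer n n le_rfl, pv_alt_eq n]
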